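-- pv_equiv track=rewrite | github.com/trunova/DQASystem | app/rag.py | _slice_with_overlap
-- ===== SOURCE A (Python) =====
-- from typing import List
--
-- def _slice_with_overlap(s: str, chunk_size: int, overlap: int) -> List[str]:
--     if chunk_size <= 0:
--         return [s] if s else []
--     res = []
--     i = 0
--     n = len(s)
--     while i < n:
--         j = min(n, i + chunk_size)
--         res.append(s[i:j])
--         if j == n:
--             break
--         i = max(j - overlap, i + 1)
--     return res
-- ===== SOURCE B (Python) =====
-- from typing import List
--
-- def _slice_with_overlap(s: str, chunk_size: int, overlap: int) -> List[str]:
--     if chunk_size <= 0: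
--         return [s] if s else []
--     n = len(s)
--     if n == 0:
--         return []
--     step = max(chunk_size - overlap, 1)
--     # number of extra chunks after the first, in closed form:
--     # the last start is the first multiple of step reaching n - chunk_size,
--     # but never a start at or past the end of the string.
--     k = max(0, min(-(-(n - chunk_size) // step), (n - 1) // step))
--     return [s[i:i + chunk_size] for i in range(0, k * step + 1, step)]
-- ===== Notes on version B (the rewrite author's own statement) =====
-- stated objective: alternative
-- what changed: Replaces A's while-loop with running 'if j == n: break' termination by a closed-form chunk count (ceiling division on the step, capped so no start lies past the end) and a single comprehension over the precomputed start offsets.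
import Mathlib
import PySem

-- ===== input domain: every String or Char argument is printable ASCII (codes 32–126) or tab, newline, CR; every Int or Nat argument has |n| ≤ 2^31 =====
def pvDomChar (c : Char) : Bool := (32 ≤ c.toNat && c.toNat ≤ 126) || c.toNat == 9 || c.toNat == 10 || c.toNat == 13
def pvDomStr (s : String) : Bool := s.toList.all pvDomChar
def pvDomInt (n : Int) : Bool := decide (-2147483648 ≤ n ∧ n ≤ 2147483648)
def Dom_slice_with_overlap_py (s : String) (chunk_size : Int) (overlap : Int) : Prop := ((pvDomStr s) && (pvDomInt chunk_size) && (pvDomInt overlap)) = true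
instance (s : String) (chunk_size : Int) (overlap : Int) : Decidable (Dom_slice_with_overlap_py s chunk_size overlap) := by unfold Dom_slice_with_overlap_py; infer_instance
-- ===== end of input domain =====

-- B replaces A's while-loop with break by a closed-form chunk count and a map over precomputed start offsets (objective: alternative).


-- ===== PORT A =====
-- the while loop: i is the cursor, res the accumulator
def sliceA_loop (s : String) (n chunk_size overlap i : Int) (res : List String) : List String :=
  if _h : i < n then
    let j := min n (i + chunk_size)
    let res' := res ++ [PySem.Str.slice s (some i) (some j)]
    if j = n then res'
    else sliceA_loop s n chunk_size overlap (max (j - overlap) (i + 1)) res'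
  else res
termination_by (n - i).toNat
decreasing_by omega

def slice_with_overlap_py (s : String) (chunk_size : Int) (overlap : Int) : List String :=
  if chunk_size ≤ 0 then (if PySem.Str.len s ≠ 0 then [s] else [])
  else sliceA_loop s (PySem.Str.len s) chunk_size overlap 0 []

-- ===== PORT B =====
def slice_with_overlap_py_alt (s : String) (chunk_size : Int) (overlap : Int) : List String :=
  if chunk_size ≤ 0 then (if PySem.Str.len s ≠ 0 then [s] else [])
  else
    let n := PySem.Str.len s
    if n = 0 then []
    else
      let step := max (chunk_size - overlap) 1
      let k := max 0 (min (-(PySem.Int.floordiv (-(n - chunk_size)) step)) (PySem.Int.floordiv (n - 1) step))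
      (PySem.List.pyRange 0 (k * step + 1) step).map
        (fun i => PySem.Str.slice s (some i) (some (i + chunk_size)))

-- ===== PRECONDITION & SPEC =====
def Spec_slice_with_overlap_py (s : String) (chunk_size : Int) (overlap : Int) (out : List String) : Prop := out = slice_with_overlap_py_alt s chunk_size overlap
instance (s : String) (chunk_size : Int) (overlap : Int) (out : List String) : Decidable (Spec_slice_with_overlap_py s chunk_size overlap out) := by unfold Spec_slice_with_overlap_py; infer_instance

-- ===== CLAIM =====
def Claim_equal_slice_with_overlap_py : Prop := ∀ (s : String) (chunk_size : Int) (overlap : Int), Dom_slice_with_overlap_py s chunk_size overlap → Spec_slice_with_overlap_py s chunk_size overlap (slice_with_overlap_py s chunk_size overlap)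

-- ===== LEMMAS AND PROOFS =====

-- common characterization: the chunks emitted from cursor i onward
def chunksFrom (s : String) (n cs stp i : Int) : List String :=
  if _h : i < n then
    if n ≤ i + cs then [PySem.Str.slice s (some i) (some n)]
    else PySem.Str.slice s (some i) (some (i + cs)) :: chunksFrom s n cs stp (i + max stp 1)
  else []
termination_by (n - i).toNat
decreasing_by omega

-- a slice whose stop bound reaches the end equals the slice stopped at the end
lemma slice_clamp (s : String) (i b : ℤ) (hi : 0 ≤ i) (hb : PySem.Str.len s ≤ b) :
    PySem.Str.slice s (some i) (some b) = PySem.Str.slice s (some i) (some (PySem.Str.len s)) := by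
  have hb0 : (0:ℤ) ≤ b := le_trans (by simp [PySem.Str.len_eq]) hb
  simp only [PySem.Str.slice]
  congr 1
  simp only [PySem.Chars.slice_eq_listSlice]
  rw [PySem.List.slice_toNat _ hi hb0, PySem.List.slice_toNat _ hi (by simp [PySem.Str.len_eq])]
  have hlen : (s.toList.drop i.toNat).length ≤ b.toNat - i.toNat := by
    simp only [List.length_drop]
    simp only [PySem.Str.len_eq] at hb
    omega
  have hlen' : (s.toList.drop i.toNat).length ≤ (PySem.Str.len s).toNat - i.toNat := by
    simp only [List.length_drop, PySem.Str.len_eq]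
    omega
  rw [List.take_of_length_le hlen, List.take_of_length_le hlen']

-- A's loop appends exactly the chunks from the cursor onward
lemma loop_eq_chunksFrom (s : String) (n cs ov : ℤ) :
    ∀ (fuel : ℕ) (i : ℤ) (res : List String), (n - i).toNat ≤ fuel →
      sliceA_loop s n cs ov i res = res ++ chunksFrom s n cs (cs - ov) i := by
  intro fuel
  induction fuel with
  | zero =>
    intro i res h
    rw [sliceA_loop, chunksFrom]
    rw [dif_neg (by omega), dif_neg (by omega)]
    simp
  | succ m ih =>
    intro i res h
    rw [sliceA_loop, chunksFrom]
    by_cases hi : i < n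
    · rw [dif_pos hi, dif_pos hi]
      simp only []
      by_cases hend : n ≤ i + cs
      · have hj : min n (i + cs) = n := by omega
        rw [hj, if_pos rfl, if_pos hend]
      · have hj : min n (i + cs) = i + cs := by omega
        rw [hj, if_neg (show ¬ (i + cs = n) by omega), if_neg hend]
        have hnext : max (i + cs - ov) (i + 1) = i + max (cs - ov) 1 := by omega
        rw [hnext, ih (i + max (cs - ov) 1) _ (by omega)]
        simp
    · rw [dif_neg hi, dif_neg hi]
      simp

-- B's start offsets enumerate exactly the chunks from the cursor onward
lemma range_map_eq_chunksFrom (s : String) (n cs ov stp c f K : ℤ)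
    (hn : n = PySem.Str.len s) (hn0 : 0 < n)
    (hstp : 0 < stp) (hstep : max (cs - ov) 1 = stp)
    (hc1 : (c - 1) * stp < n - cs) (hc2 : n - cs ≤ c * stp)
    (hf1 : f * stp ≤ n - 1) (hf2 : n - 1 < (f + 1) * stp)
    (hK : K = max 0 (min c f)) :
    ∀ (r : ℕ) (j : ℤ), 0 ≤ j → j + r = K + 1 → 1 ≤ r →
      (List.range r).map
          (fun (k : ℕ) => PySem.Str.slice s (some (stp * (j + (k : ℤ)))) (some (stp * (j + (k : ℤ)) + cs)))
        = chunksFrom s n cs (cs - ov) (stp * j) := by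
  have hf0 : 0 ≤ f := by
    by_contra hneg
    have h1 : f + 1 ≤ 0 := by omega
    have h2 : (f + 1) * stp ≤ 0 * stp := mul_le_mul_of_nonneg_right h1 (le_of_lt hstp)
    rw [zero_mul] at h2
    omega
  intro r
  induction r with
  | zero => intro j _ _ hr; omega
  | succ m ih =>
    intro j hj0 hjr _
    have hjK : j ≤ K := by omega
    have hjf : j ≤ f := by omega
    have hjn : stp * j < n := by
      have := mul_le_mul_of_nonneg_left hjf (le_of_lt hstp)
      nlinarith
    rw [chunksFrom, dif_pos hjn]
    by_cases hend : n ≤ stp * j + cs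
    · -- final chunk reaching the end: j must be K and m = 0
      have hjc : c ≤ j := by
        by_contra hlt
        have hj1 : j ≤ c - 1 := by omega
        have := mul_le_mul_of_nonneg_right hj1 (le_of_lt hstp)
        nlinarith
      have hjK' : j = K := by omega
      have hm : m = 0 := by omega
      rw [if_pos hend, hm]
      simp only [List.range_succ, List.range_zero, List.nil_append, List.map_cons,
        List.map_nil, Nat.cast_zero, add_zero]
      rw [slice_clamp s (stp * j) (stp * j + cs) (mul_nonneg (le_of_lt hstp) hj0) (by omega)]
      rw [← hn]
    · rw [if_neg hend]
      have hjc : j < c := by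
        by_contra hge
        have : c ≤ j := by omega
        have := mul_le_mul_of_nonneg_right this (le_of_lt hstp)
        nlinarith
      have hnext : stp * j + max (cs - ov) 1 = stp * (j + 1) := by rw [hstep]; ring
      by_cases hcont : stp * (j + 1) < n
      · -- the loop continues: j + 1 ≤ K
        have hjf1 : j + 1 ≤ f := by
          by_contra hgt
          have : f + 1 ≤ j + 1 := by omega
          have := mul_le_mul_of_nonneg_right this (le_of_lt hstp)
          nlinarith
        have hj1K : j + 1 ≤ K := by
          have : 0 ≤ min c f := by omega
          omega
        have hm1 : 1 ≤ m := by omega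
        rw [hnext, ← ih (j + 1) (by omega) (by omega) hm1]
        rw [List.range_succ_eq_map, List.map_cons, List.map_map]
        simp only [Nat.cast_zero, add_zero]
        congr 1
        apply List.map_congr_left
        intro k _
        simp only [Function.comp_apply, Nat.succ_eq_add_one]
        have harg2 : j + (((k : ℤ)) + 1) = j + 1 + (k : ℤ) := by ring
        push_cast
        rw [harg2]
      · -- next cursor is past the end: j = K and m = 0, the tail is empty
        have hjf' : f ≤ j := by
          by_contra hlt
          have : j + 1 ≤ f := by omega
          have := mul_le_mul_of_nonneg_right this (le_of_lt hstp)
          nlinarith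
        have hKj : K ≤ j := by
          have : min c f ≤ f := min_le_right _ _
          omega
        have hm : m = 0 := by omega
        rw [hnext, chunksFrom, dif_neg (by omega), hm]
        simp

-- ===== VERDICT =====
theorem slice_with_overlap_py_spec : Claim_equal_slice_with_overlap_py := by
  intro s cs ov _
  unfold Spec_slice_with_overlap_py slice_with_overlap_py slice_with_overlap_py_alt
  by_cases hcs : cs ≤ 0
  · rw [if_pos hcs, if_pos hcs]
  · rw [if_neg hcs, if_neg hcs]
    simp only []
    set n := PySem.Str.len s with hn
    have hn0 : 0 ≤ n := by simp [hn, PySem.Str.len_eq]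
    by_cases hz : n = 0
    · rw [if_pos hz]
      rw [loop_eq_chunksFrom s n cs ov (n - 0).toNat 0 [] le_rfl]
      rw [chunksFrom, dif_neg (by omega)]
      simp
    · rw [if_neg hz]
      have hn0' : 0 < n := by omega
      set stp := max (cs - ov) 1 with hstp
      have hstp0 : 0 < stp := by omega
      set c := -(PySem.Int.floordiv (-(n - cs)) stp) with hcdef
      set f := PySem.Int.floordiv (n - 1) stp with hfdef
      set K := max 0 (min c f) with hKdef
      obtain ⟨hc1, hc2⟩ := (PySem.Int.neg_floordiv_neg_eq_iff_of_pos hstp0).mp hcdef.symm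
      obtain ⟨hf1, hf2⟩ := (PySem.Int.floordiv_eq_iff_of_pos hstp0).mp hfdef.symm
      have hK0 : 0 ≤ K := by omega
      have hKstp : 0 ≤ K * stp := mul_nonneg hK0 hstp0.le
      rw [loop_eq_chunksFrom s n cs ov (n - 0).toNat 0 [] le_rfl]
      rw [PySem.List.pyRange_of_pos 0 (K * stp + 1) hstp0]
      rw [if_pos (by omega)]
      have harg : K * stp + 1 - 0 + stp - 1 = (K + 1) * stp := by ring
      rw [harg, Int.mul_ediv_cancel _ (ne_of_gt hstp0), List.map_map]
      have hmain := range_map_eq_chunksFrom s n cs ov stp c f K hn hn0' hstp0 hstp.symm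
        hc1 hc2 hf1 hf2 hKdef (K + 1).toNat 0 le_rfl (by omega) (by omega)
      rw [mul_zero] at hmain
      rw [← hmain, List.nil_append]
      apply List.map_congr_left
      intro k _
      simp only [Function.comp]
      congr 2 <;> ring
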